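-- pv_equiv track=rewrite | github.com/baltasarlopezv/Lenguajes-Automatas | pela.py | _dividir_en_terminos
-- ===== SOURCE A (Python) =====
-- def _dividir_en_terminos(expr):
--     """Divide la expresión en términos para concatenación"""
--     terminos = []
--     i = 0
--     while i < len(expr):
--         if expr[i] == '(':
--             # Encontrar el paréntesis de cierre correspondiente
--             nivel = 1
--             j = i + 1
--             while j < len(expr) and nivel > 0:
--                 if expr[j] == '(':
--                     nivel += 1
--                 elif expr[j] == ')':
--                     nivel -= 1
--                 j += 1
--
--             # Agregar el contenido con paréntesis y posible *
--             termino = expr[i:j]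
--             if j < len(expr) and expr[j] == '*':
--                 termino += '*'
--                 j += 1
--             terminos.append(termino)
--             i = j
--         else:
--             # Carácter simple, posiblemente seguido de *
--             termino = expr[i]
--             if i + 1 < len(expr) and expr[i + 1] == '*':
--                 termino += '*'
--                 i += 2
--             else:
--                 i += 1
--             terminos.append(termino)
--
--     return terminos
-- ===== SOURCE B (Python) =====
-- def _dividir_en_terminos(expr):
--     """Divide la expresion en terminos: pass 1 precomputes a paren-match table
--     with a stack, pass 2 slices terms by jumping through that table."""
--     cierre = {}
--     stack = []
--     for k, c in enumerate(expr):
--         if c == '(':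
--             stack.append(k)
--         elif c == ')' and stack:
--             cierre[stack.pop()] = k
--     terminos = []
--     n = len(expr)
--     i = 0
--     while i < n:
--         if expr[i] == '(':
--             j = cierre.get(i)
--             if j is None:
--                 terminos.append(expr[i:])
--                 break
--             j += 1
--         else:
--             j = i + 1
--         if j < n and expr[j] == '*':
--             j += 1
--         terminos.append(expr[i:j])
--         i = j
--     return terminos
-- ===== Notes on version B (the rewrite author's own statement) =====
-- stated objective: alternative
-- what changed: Replaced A's nested counting loop by a two-stage algorithm: a stack-based pass precomputes a dictionary mapping each '(' to its matching ')', then a slicing pass jumps through that table in whole-slice steps instead of re-walking each group character by character.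
import Mathlib
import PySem

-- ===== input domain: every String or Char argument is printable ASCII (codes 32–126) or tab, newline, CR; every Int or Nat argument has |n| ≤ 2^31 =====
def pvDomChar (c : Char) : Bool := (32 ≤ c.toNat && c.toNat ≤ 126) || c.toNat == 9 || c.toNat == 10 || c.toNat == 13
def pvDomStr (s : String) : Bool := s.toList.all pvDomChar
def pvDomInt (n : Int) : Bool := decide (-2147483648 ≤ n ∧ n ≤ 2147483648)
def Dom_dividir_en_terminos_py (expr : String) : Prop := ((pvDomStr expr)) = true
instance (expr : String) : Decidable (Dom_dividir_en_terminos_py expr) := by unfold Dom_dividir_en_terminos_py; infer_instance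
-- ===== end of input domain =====

-- B replaces A's nested counting loop by a two-stage algorithm: a stack pass that
-- precomputes the matching ')' of every '(' in a dictionary, then a slicing pass
-- that jumps through that table (objective: alternative, same asymptotic cost).

-- ===== PORT A =====
-- inner loop of A: 'while j < len(expr) and nivel > 0: …'; returns (consumed chars, rest)
def pvMatchParen : Nat → List Char → List Char × List Char
  | _, [] => ([], [])
  | nivel, c :: rest =>
    if nivel = 0 then ([], c :: rest)
    else
      let nivel' := if c = '(' then nivel + 1 else if c = ')' then nivel - 1 else nivel
      let p := pvMatchParen nivel' rest
      (c :: p.1, p.2)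

-- A's "if j < len(expr) and expr[j] == '*': termino += '*'; j += 1": (star suffix, rest)
def pvStarOf (r : List Char) : List Char × List Char :=
  if r.head? = some '*' then (['*'], r.tail) else ([], r)

theorem pvMatchParen_rest_le (nivel : Nat) (cs : List Char) :
    (pvMatchParen nivel cs).2.length ≤ cs.length := by
  induction cs generalizing nivel with
  | nil => simp [pvMatchParen]
  | cons c rest ih =>
    simp only [pvMatchParen]
    split
    · simp
    · simpa using Nat.le_succ_of_le (ih _)

theorem pvStarOf_rest_le (cs : List Char) : (pvStarOf cs).2.length ≤ cs.length := by
  unfold pvStarOf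
  split
  · simp
  · simp

-- outer loop of A over the remaining characters
def pvGoA : List Char → List (List Char)
  | [] => []
  | c :: rest =>
    if c = '(' then
      let p := pvMatchParen 1 rest
      let q := pvStarOf p.2
      (('(' :: p.1) ++ q.1) :: pvGoA q.2
    else
      let q := pvStarOf rest
      (c :: q.1) :: pvGoA q.2
termination_by cs => cs.length
decreasing_by
  · have h1 := pvMatchParen_rest_le 1 rest
    have h2 := pvStarOf_rest_le (pvMatchParen 1 rest).2
    simp only [List.length_cons]
    omega
  · have h2 := pvStarOf_rest_le rest
    simp only [List.length_cons]
    omega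

def dividir_en_terminos_py (expr : String) : List String :=
  (pvGoA expr.toList).map (fun t => String.ofList t)

-- ===== PORT B =====
-- pass 1 of B: 'for k, c in enumerate(expr): …' building the match dictionary
-- (Python's stack list, pushed/popped at the end, is the Lean list pushed/popped at the head)
def pvBuild : Nat → List Char → List Nat → PySem.Dict Nat Nat → PySem.Dict Nat Nat
  | _, [], _, d => d
  | k, c :: rest, stack, d =>
    if c = '(' then pvBuild (k+1) rest (k :: stack) d
    else if c = ')' then
      match stack with
      | [] => pvBuild (k+1) rest [] d
      | s :: ss => pvBuild (k+1) rest ss (d.insert s k)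
    else pvBuild (k+1) rest stack d

-- pass 2 of B: 'while i < n: …'; fuel only makes the recursion structural; with the
-- real table every step advances i, so fuel = n never runs out on the actual call
def pvGoB (d : PySem.Dict Nat Nat) (L : List Char) (n : Nat) : Nat → Nat → List (List Char)
  | 0, _ => []
  | fuel+1, i =>
    if i < n then
      if L[i]? = some '(' then
        match d.get? i with
        | none => [L.drop i]                      -- unmatched '(': rest-of-string term, break
        | some j0 =>                              -- j = j0 + 1; 'if j < n and expr[j] == "*"'
          if L[j0+1]? = some '*' then
            ((L.drop i).take (j0+1+1 - i)) :: pvGoB d L n fuel (j0+1+1)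
          else
            ((L.drop i).take (j0+1 - i)) :: pvGoB d L n fuel (j0+1)
      else                                        -- j = i + 1
        if L[i+1]? = some '*' then
          ((L.drop i).take (i+1+1 - i)) :: pvGoB d L n fuel (i+1+1)
        else
          ((L.drop i).take (i+1 - i)) :: pvGoB d L n fuel (i+1)
    else []

def dividir_en_terminos_py_alt (expr : String) : List String :=
  (pvGoB (pvBuild 0 expr.toList [] PySem.Dict.empty) expr.toList expr.toList.length
    expr.toList.length 0).map (fun t => String.ofList t)

-- ===== PRECONDITION & SPEC =====
def Spec_dividir_en_terminos_py (expr : String) (out : List String) : Prop := out = dividir_en_terminos_py_alt expr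
instance (expr : String) (out : List String) : Decidable (Spec_dividir_en_terminos_py expr out) := by unfold Spec_dividir_en_terminos_py; infer_instance

-- ===== CLAIM =====
def Claim_equal_dividir_en_terminos_py : Prop := ∀ (expr : String), Dom_dividir_en_terminos_py expr → Spec_dividir_en_terminos_py expr (dividir_en_terminos_py expr)

-- ===== LEMMAS AND PROOFS =====

-- number of characters A's inner loop consumes from level `nivel` (none = runs off the end)
def pvFindClose : Nat → List Char → Option Nat
  | 0, _ => some 0
  | _+1, [] => none
  | n+1, c :: rest =>
    (pvFindClose (if c = '(' then n+1+1 else if c = ')' then n+1-1 else n+1) rest).map (· + 1)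

-- position of q in the stack (0 = top)
def pvDepth : List Nat → Nat → Option Nat
  | [], _ => none
  | s :: ss, q => if q = s then some 0 else (pvDepth ss q).map (· + 1)

theorem pvMatchParen_eq_findClose (cs : List Char) : ∀ nivel,
    pvMatchParen nivel cs =
      match pvFindClose nivel cs with
      | some k => (cs.take k, cs.drop k)
      | none => (cs, []) := by
  induction cs with
  | nil => intro nivel; cases nivel <;> simp [pvMatchParen, pvFindClose]
  | cons c rest ih =>
    intro nivel
    cases nivel with
    | zero => simp [pvMatchParen, pvFindClose]
    | succ m =>
      rw [pvMatchParen, pvFindClose]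
      simp only [Nat.succ_ne_zero, if_false, ih]
      cases pvFindClose (if c = '(' then m+1+1 else if c = ')' then m+1-1 else m+1) rest <;>
        simp

theorem pvDepth_mem {stack : List Nat} {q t : Nat} (h : pvDepth stack q = some t) :
    q ∈ stack := by
  induction stack generalizing t with
  | nil => simp [pvDepth] at h
  | cons s ss ih =>
    by_cases hq : q = s
    · simp [hq]
    · simp only [pvDepth, if_neg hq, Option.map_eq_some_iff] at h
      obtain ⟨u, hu, _⟩ := h
      exact List.mem_cons_of_mem _ (ih hu)

theorem pvMapNat (X : Option Nat) {f g : Nat → Nat} (h : ∀ m, f m = g m) :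
    X.map f = X.map g := by
  cases X <;> simp [h]

theorem pvFindClose_open (n : Nat) (rest : List Char) :
    pvFindClose (n+1) ('('::rest) = (pvFindClose (n+1+1) rest).map (· + 1) := by
  simp [pvFindClose]

theorem pvFindClose_close (n : Nat) (rest : List Char) :
    pvFindClose (n+1) (')'::rest) = (pvFindClose n rest).map (· + 1) := by
  simp [pvFindClose]

theorem pvFindClose_other {c : Char} (hc : c ≠ '(') (hc2 : c ≠ ')') (n : Nat)
    (rest : List Char) :
    pvFindClose (n+1) (c::rest) = (pvFindClose (n+1) rest).map (· + 1) := by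
  simp [pvFindClose, hc, hc2]

theorem pvBuild_get (cs : List Char) : ∀ (k : Nat) (stack : List Nat) (d : PySem.Dict Nat Nat),
    (∀ s ∈ stack, s < k) → stack.Nodup →
    (∀ x : Nat, (d.get? x).isSome = true → x < k ∧ x ∉ stack) →
    ∀ q : Nat,
    (pvBuild k cs stack d).get? q =
      if k ≤ q ∧ (cs.drop (q - k)).head? = some '(' then
        (pvFindClose 1 (cs.drop (q - k + 1))).map (fun t => q + t)
      else
        match pvDepth stack q with
        | some t => (pvFindClose (t+1) cs).map (fun m => k + m - 1)
        | none => d.get? q := by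
  induction cs with
  | nil =>
    intro k stack d hlt hnd hd q
    simp only [pvBuild, List.drop_nil, List.head?_nil]
    rw [if_neg (by simp)]
    cases hdep : pvDepth stack q with
    | none => rfl
    | some t =>
      have hget : d.get? q = none := by
        cases hg : d.get? q with
        | none => rfl
        | some v => exact absurd (pvDepth_mem hdep) (hd q (by simp [hg])).2
      simp [pvFindClose, hget]
  | cons c rest ih =>
    intro k stack d hlt hnd hd q
    by_cases hc : c = '('
    · subst hc
      rw [show pvBuild k ('('::rest) stack d = pvBuild (k+1) rest (k::stack) d from by
        simp [pvBuild]]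
      have hknot : k ∉ stack := fun hm => absurd (hlt k hm) (lt_irrefl k)
      rw [ih (k+1) (k::stack) d
        (by intro s hs
            rcases List.mem_cons.mp hs with h | h
            · omega
            · exact Nat.lt_succ_of_lt (hlt s h))
        (List.nodup_cons.mpr ⟨hknot, hnd⟩)
        (by intro x hx; obtain ⟨h1, h2⟩ := hd x hx
            exact ⟨Nat.lt_succ_of_lt h1, by simp [List.mem_cons]; exact ⟨by omega, h2⟩⟩) q]
      by_cases hqk : q = k
      · subst hqk
        rw [if_neg (by rintro ⟨h1, -⟩; omega), if_pos (by simp)]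
        simp only [pvDepth, Nat.sub_self, Nat.zero_add, List.drop_succ_cons,
          List.drop_zero]
        exact pvMapNat _ (by intro m; omega)
      · have hdep : pvDepth (k::stack) q = (pvDepth stack q).map (· + 1) := by
          simp [pvDepth, hqk]
        have hbranch : (match pvDepth (k::stack) q with
            | some t => (pvFindClose (t+1) rest).map (fun m => k + 1 + m - 1)
            | none => d.get? q) =
            (match pvDepth stack q with
            | some t => (pvFindClose (t+1) ('('::rest)).map (fun m => k + m - 1)
            | none => d.get? q) := by
          rw [hdep]
          cases hdq : pvDepth stack q with
          | none => rfl
          | some t =>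
            simp only [Option.map_some]
            rw [pvFindClose_open, Option.map_map]
            exact pvMapNat _ (by intro m; simp only [Function.comp]; omega)
        by_cases hq2 : k + 1 ≤ q
        · have e1 : q - k = (q - (k+1)) + 1 := by omega
          have e2 : q - k + 1 = (q - (k+1) + 1) + 1 := by omega
          rw [e2, e1, List.drop_succ_cons, List.drop_succ_cons]
          by_cases hcond : (rest.drop (q - (k+1))).head? = some '('
          · rw [if_pos ⟨hq2, hcond⟩, if_pos ⟨by omega, hcond⟩]
          · rw [if_neg (by tauto), if_neg (by tauto)]
            exact hbranch
        · rw [if_neg (by rintro ⟨h1, -⟩; omega), if_neg (by rintro ⟨h1, -⟩; omega)]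
          exact hbranch
    · by_cases hc2 : c = ')'
      · subst hc2
        cases stack with
        | nil =>
          rw [show pvBuild k (')'::rest) [] d = pvBuild (k+1) rest [] d from by simp [pvBuild]]
          rw [ih (k+1) [] d (by simp) (by simp)
            (by intro x hx; exact ⟨Nat.lt_succ_of_lt (hd x hx).1, by simp⟩) q]
          by_cases hqk : q = k
          · subst hqk
            rw [if_neg (by rintro ⟨h1, -⟩; omega),
              if_neg (by rintro ⟨-, h⟩; rw [Nat.sub_self] at h; simp at h)]
            simp [pvDepth]
          · by_cases hq2 : k + 1 ≤ q
            · have e1 : q - k = (q - (k+1)) + 1 := by omega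
              have e2 : q - k + 1 = (q - (k+1) + 1) + 1 := by omega
              rw [e2, e1, List.drop_succ_cons, List.drop_succ_cons]
              by_cases hcond : (rest.drop (q - (k+1))).head? = some '('
              · rw [if_pos ⟨hq2, hcond⟩, if_pos ⟨by omega, hcond⟩]
              · rw [if_neg (by tauto), if_neg (by tauto)]
                simp [pvDepth]
            · rw [if_neg (by rintro ⟨h1, -⟩; omega), if_neg (by rintro ⟨h1, -⟩; omega)]
              simp [pvDepth]
        | cons s ss =>
          rw [show pvBuild k (')'::rest) (s::ss) d = pvBuild (k+1) rest ss (d.insert s k) from by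
            simp [pvBuild]]
          have hslt : s < k := hlt s (by simp)
          have hsss : s ∉ ss := (List.nodup_cons.mp hnd).1
          rw [ih (k+1) ss (d.insert s k)
            (by intro x hx; exact Nat.lt_succ_of_lt (hlt x (List.mem_cons_of_mem _ hx)))
            (List.nodup_cons.mp hnd).2
            (by intro x hx
                rw [PySem.Dict.get?_insert] at hx
                by_cases hxs : x = s
                · subst hxs; exact ⟨by omega, hsss⟩
                · rw [if_neg hxs] at hx
                  obtain ⟨h1, h2⟩ := hd x hx
                  exact ⟨by omega, fun hm => h2 (List.mem_cons_of_mem _ hm)⟩) q]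
          have hbranch : (match pvDepth ss q with
              | some t => (pvFindClose (t+1) rest).map (fun m => k + 1 + m - 1)
              | none => (d.insert s k).get? q) =
              (match pvDepth (s::ss) q with
              | some t => (pvFindClose (t+1) (')'::rest)).map (fun m => k + m - 1)
              | none => d.get? q) := by
            by_cases hqs : q = s
            · have hdss : pvDepth ss q = none := by
                cases hdq : pvDepth ss q with
                | none => rfl
                | some t => exact absurd (pvDepth_mem hdq) (fun hm => hsss (hqs ▸ hm))
              rw [hdss, show pvDepth (s::ss) q = some 0 from by simp [pvDepth, hqs],
                PySem.Dict.get?_insert, if_pos hqs]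
              show some k = (pvFindClose (0+1) (')'::rest)).map (fun m => k + m - 1)
              rw [pvFindClose_close]
              simp [pvFindClose]
            · rw [show pvDepth (s::ss) q = (pvDepth ss q).map (· + 1) from by
                simp [pvDepth, hqs]]
              cases hdq : pvDepth ss q with
              | none =>
                simp only [Option.map_none]
                rw [PySem.Dict.get?_insert, if_neg hqs]
              | some t =>
                simp only [Option.map_some]
                rw [pvFindClose_close, Option.map_map]
                exact pvMapNat _ (by intro m; simp only [Function.comp]; omega)
          by_cases hqk : q = k
          · subst hqk
            rw [if_neg (by rintro ⟨h1, -⟩; omega),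
              if_neg (by rintro ⟨-, h⟩; rw [Nat.sub_self] at h; simp at h)]
            exact hbranch
          · by_cases hq2 : k + 1 ≤ q
            · have e1 : q - k = (q - (k+1)) + 1 := by omega
              have e2 : q - k + 1 = (q - (k+1) + 1) + 1 := by omega
              rw [e2, e1, List.drop_succ_cons, List.drop_succ_cons]
              by_cases hcond : (rest.drop (q - (k+1))).head? = some '('
              · rw [if_pos ⟨hq2, hcond⟩, if_pos ⟨by omega, hcond⟩]
              · rw [if_neg (by tauto), if_neg (by tauto)]
                exact hbranch
            · rw [if_neg (by rintro ⟨h1, -⟩; omega), if_neg (by rintro ⟨h1, -⟩; omega)]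
              exact hbranch
      · rw [show pvBuild k (c::rest) stack d = pvBuild (k+1) rest stack d from by
          simp [pvBuild, hc, hc2]]
        rw [ih (k+1) stack d
          (by intro s hs; exact Nat.lt_succ_of_lt (hlt s hs)) hnd
          (by intro x hx; exact ⟨Nat.lt_succ_of_lt (hd x hx).1, (hd x hx).2⟩) q]
        have hbranch : (match pvDepth stack q with
            | some t => (pvFindClose (t+1) rest).map (fun m => k + 1 + m - 1)
            | none => d.get? q) =
            (match pvDepth stack q with
            | some t => (pvFindClose (t+1) (c::rest)).map (fun m => k + m - 1)
            | none => d.get? q) := by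
          cases hdq : pvDepth stack q with
          | none => rfl
          | some t =>
            show (pvFindClose (t+1) rest).map (fun m => k + 1 + m - 1)
                = (pvFindClose (t+1) (c::rest)).map (fun m => k + m - 1)
            rw [pvFindClose_other hc hc2, Option.map_map]
            exact pvMapNat _ (by intro m; simp only [Function.comp]; omega)
        by_cases hqk : q = k
        · subst hqk
          rw [if_neg (by rintro ⟨h1, -⟩; omega),
            if_neg (by rintro ⟨-, h⟩; rw [Nat.sub_self] at h; simp at h; exact hc h)]
          exact hbranch
        · by_cases hq2 : k + 1 ≤ q
          · have e1 : q - k = (q - (k+1)) + 1 := by omega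
            have e2 : q - k + 1 = (q - (k+1) + 1) + 1 := by omega
            rw [e2, e1, List.drop_succ_cons, List.drop_succ_cons]
            by_cases hcond : (rest.drop (q - (k+1))).head? = some '('
            · rw [if_pos ⟨hq2, hcond⟩, if_pos ⟨by omega, hcond⟩]
            · rw [if_neg (by tauto), if_neg (by tauto)]
              exact hbranch
          · rw [if_neg (by rintro ⟨h1, -⟩; omega), if_neg (by rintro ⟨h1, -⟩; omega)]
            exact hbranch

theorem pvGoA_cons_open (rest : List Char) :
    pvGoA ('('::rest) =
      (('(' :: (pvMatchParen 1 rest).1) ++ (pvStarOf (pvMatchParen 1 rest).2).1)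
        :: pvGoA (pvStarOf (pvMatchParen 1 rest).2).2 := by
  rw [pvGoA]
  simp

theorem pvGoA_cons_other {c : Char} (hc : ¬ c = '(') (rest : List Char) :
    pvGoA (c::rest) = (c :: (pvStarOf rest).1) :: pvGoA (pvStarOf rest).2 := by
  rw [pvGoA]
  simp [hc]

theorem pvCierre_get (L : List Char) (i : Nat) :
    (pvBuild 0 L [] PySem.Dict.empty).get? i =
      if (L.drop i).head? = some '(' then
        (pvFindClose 1 (L.drop (i + 1))).map (fun t => i + t)
      else none := by
  rw [pvBuild_get L 0 [] PySem.Dict.empty (by simp) (by simp)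
    (by intro x hx; simp [PySem.Dict.get?_empty] at hx) i]
  simp [pvDepth, PySem.Dict.get?_empty]

theorem pvGoB_eq_pvGoA (L : List Char) : ∀ (fuel i : Nat), L.length - i ≤ fuel →
    pvGoB (pvBuild 0 L [] PySem.Dict.empty) L L.length fuel i = pvGoA (L.drop i) := by
  intro fuel
  induction fuel with
  | zero =>
    intro i h
    rw [List.drop_eq_nil_of_le (by omega)]
    simp [pvGoB, pvGoA]
  | succ fuel ih =>
    intro i h
    by_cases hin : i < L.length
    · have hdrop : L.drop i = L[i] :: L.drop (i+1) := (List.getElem_cons_drop hin).symm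
      have hgeti : L[i]? = some L[i] := List.getElem?_eq_getElem hin
      have hhead : (L.drop i).head? = L[i]? := List.head?_drop
      rw [pvGoB, if_pos hin]
      by_cases hci : L[i] = '('
      · rw [if_pos (show L[i]? = some '(' from by rw [hgeti, hci])]
        rw [pvCierre_get, if_pos (show (L.drop i).head? = some '(' from by
          rw [hhead, hgeti, hci])]
        cases hFc : pvFindClose 1 (L.drop (i+1)) with
        | none =>
          simp only [Option.map_none]
          conv_rhs => rw [hdrop, hci]
          rw [pvGoA_cons_open,
            show pvMatchParen 1 (L.drop (i+1)) = (L.drop (i+1), []) from by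
              rw [pvMatchParen_eq_findClose, hFc]]
          simp [pvStarOf, pvGoA, hdrop, hci]
        | some t =>
          simp only [Option.map_some]
          conv_rhs => rw [hdrop, hci]
          rw [pvGoA_cons_open,
            show pvMatchParen 1 (L.drop (i+1))
                = ((L.drop (i+1)).take t, L.drop (i+1+t)) from by
              rw [pvMatchParen_eq_findClose, hFc]
              show ((L.drop (i+1)).take t, (L.drop (i+1)).drop t) = _
              rw [List.drop_drop]]
          dsimp only []
          have htail : (L.drop (i+1+t)).head? = L[i+t+1]? := by
            rw [List.head?_drop, show i+1+t = i+t+1 from by omega]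
          by_cases hstar : L[i+t+1]? = some '*'
          · rw [show pvStarOf (L.drop (i+1+t)) = (['*'], L.drop (i+t+2)) from by
              rw [pvStarOf, if_pos (htail.trans hstar), List.tail_drop,
                show i+1+t+1 = i+t+2 from by omega]]
            rw [if_pos hstar]
            rw [ih (i+t+2) (by omega)]
            have hterm : (L.drop i).take (i+t+1+1-i)
                = '(' :: ((L.drop (i+1)).take t ++ ['*']) := by
              rw [show i+t+1+1-i = (t+1)+1 from by omega, hdrop, hci, List.take_succ_cons,
                List.take_add_one, List.getElem?_drop,
                show i+1+t = i+t+1 from by omega, hstar]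
              rfl
            rw [hterm]
            simp
          · rw [show pvStarOf (L.drop (i+1+t)) = ([], L.drop (i+1+t)) from by
              rw [pvStarOf, if_neg (by rw [htail]; exact hstar)]]
            rw [if_neg hstar]
            rw [show i+1+t = i+t+1 from by omega, ih (i+t+1) (by omega)]
            have hterm : (L.drop i).take (i+t+1-i) = '(' :: (L.drop (i+1)).take t := by
              rw [show i+t+1-i = t+1 from by omega, hdrop, hci, List.take_succ_cons]
            rw [hterm]
            simp
      · rw [if_neg (show ¬ L[i]? = some '(' from by rw [hgeti]; simp [hci])]
        conv_rhs => rw [hdrop]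
        rw [pvGoA_cons_other hci]
        have htail : (L.drop (i+1)).head? = L[i+1]? := List.head?_drop
        by_cases hstar : L[i+1]? = some '*'
        · rw [show pvStarOf (L.drop (i+1)) = (['*'], L.drop (i+2)) from by
            rw [pvStarOf, if_pos (htail.trans hstar), List.tail_drop]]
          rw [if_pos hstar]
          rw [ih (i+2) (by omega)]
          have hterm : (L.drop i).take (i+1+1-i) = [L[i], '*'] := by
            rw [show i+1+1-i = (0+1)+1 from by omega, hdrop, List.take_succ_cons,
              List.take_add_one, List.take_zero, List.getElem?_drop,
              show i+1+0 = i+1 from by omega, hstar]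
            rfl
          rw [hterm]
        · rw [show pvStarOf (L.drop (i+1)) = ([], L.drop (i+1)) from by
            rw [pvStarOf, if_neg (by rw [htail]; exact hstar)]]
          rw [if_neg hstar]
          rw [ih (i+1) (by omega)]
          have hterm : (L.drop i).take (i+1-i) = [L[i]] := by
            rw [show i+1-i = 0+1 from by omega, hdrop, List.take_succ_cons, List.take_zero]
          rw [hterm]
    · rw [pvGoB, if_neg hin, List.drop_eq_nil_of_le (by omega)]
      simp [pvGoA]

-- ===== VERDICT =====
theorem dividir_en_terminos_py_spec : Claim_equal_dividir_en_terminos_py := by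
  intro expr _
  unfold Spec_dividir_en_terminos_py dividir_en_terminos_py dividir_en_terminos_py_alt
  rw [pvGoB_eq_pvGoA expr.toList expr.toList.length 0 (by omega)]
  simp
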